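-- pv_equiv track=rewrite | github.com/Vladislav-Dzyadevich/goit-algo-hw-08 | goit-algo-hw-08.py | minimize_costs
-- ===== SOURCE A (Python) =====
-- def minimize_costs(cables):
--     connections = [(i, j, cables[i] + cables[j]) for i in range(len(cables)) for j in range(i+1, len(cables))]
--     connections.sort(key=lambda x: x[2])  # сортуємо за зростанням суми довжин
--
--     total_cost = 0
--     while len(connections) > 0:
--         # беремо найменший з'єднувач
--         i, j, cost = connections.pop(0)
--         total_cost += cost
--
--         # об'єднуємо кабелі та додаємо новий кабель до списку
--         cables.append(cables[i] + cables[j])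
--
--     return total_cost
-- ===== SOURCE B (Python) =====
-- def minimize_costs(cables):
--     # Each cable value participates in exactly len(cables)-1 of the pairwise
--     # sums that A accumulates, so the total is (n - 1) * sum(cables).
--     # (A also appends to `cables`; B leaves it untouched — return value only.)
--     return (len(cables) - 1) * sum(cables)
-- ===== Notes on version B (the rewrite author's own statement) =====
-- stated objective: faster
-- what changed: Replaced the build-all-pairs + sort + pop loop with the closed form (len(cables)-1)*sum(cables), since every element occurs in exactly n-1 pairwise sums; B does not mutate the input list (A appends to it).
import Mathlib
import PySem

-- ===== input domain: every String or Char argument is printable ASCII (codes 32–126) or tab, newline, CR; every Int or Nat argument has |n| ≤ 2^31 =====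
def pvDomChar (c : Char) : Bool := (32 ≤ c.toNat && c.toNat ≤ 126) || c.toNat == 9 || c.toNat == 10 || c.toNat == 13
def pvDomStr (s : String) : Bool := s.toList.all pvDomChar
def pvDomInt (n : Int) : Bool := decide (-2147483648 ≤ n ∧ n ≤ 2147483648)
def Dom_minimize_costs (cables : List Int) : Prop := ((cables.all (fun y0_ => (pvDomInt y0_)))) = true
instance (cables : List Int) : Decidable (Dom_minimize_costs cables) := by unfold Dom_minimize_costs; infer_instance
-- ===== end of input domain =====

-- B replaces A's build-all-pairs + sort + pop loop by the closed form (n-1)*sum (faster, asymptotic);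
-- A also appends to `cables` in place, B does not: the equivalence proved here is about the RETURN value only.


-- ===== PORT A =====
-- the while-loop: pop(0) the cheapest connection, add its cost, append the merged cable
-- (indices i, j in the connection list are always in range of the growing `cab`, so pyGetD is exact here)
def minimizeCostsLoopA : List (Int × Int × Int) → List Int → Int → Int
  | [], _, total => total
  | (i, j, cost) :: rest, cab, total =>
      minimizeCostsLoopA rest
        (cab ++ [PySem.List.pyGetD cab i 0 + PySem.List.pyGetD cab j 0])
        (total + cost)

def minimize_costs (cables : List Int) : Int :=
  let n : Int := (cables.length : Int)
  let connections :=
    (PySem.List.pyRange 0 n 1).flatMap (fun i =>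
      (PySem.List.pyRange (i + 1) n 1).map (fun j =>
        (i, j, PySem.List.pyGetD cables i 0 + PySem.List.pyGetD cables j 0)))
  let sortedConns := PySem.List.sorted connections (fun x => x.2.2) false
  minimizeCostsLoopA sortedConns cables 0

-- ===== PORT B =====
def minimize_costs_alt (cables : List Int) : Int :=
  ((cables.length : Int) - 1) * cables.sum

-- ===== PRECONDITION & SPEC =====
def Spec_minimize_costs (cables : List Int) (out : Int) : Prop := out = minimize_costs_alt cables
instance (cables : List Int) (out : Int) : Decidable (Spec_minimize_costs cables out) := by unfold Spec_minimize_costs; infer_instance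

-- ===== CLAIM (what is proved, stated in full; the proofs are below) =====
def Claim_equal_minimize_costs : Prop := ∀ (cables : List Int), Dom_minimize_costs cables → Spec_minimize_costs cables (minimize_costs cables)

-- ===== LEMMAS AND PROOFS =====

-- the loop just sums the third components of the connections
lemma minimizeCostsLoopA_eq (l : List (Int × Int × Int)) :
    ∀ (cab : List Int) (t : Int), minimizeCostsLoopA l cab t = t + (l.map (·.2.2)).sum := by
  induction l with
  | nil => intro cab t; simp [minimizeCostsLoopA]
  | cons x rest ih =>
      intro cab t
      obtain ⟨i, j, c⟩ := x
      simp [minimizeCostsLoopA, ih]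
      ring

lemma sum_flatMap_int (l : List Int) (f : Int → List Int) :
    (l.flatMap f).sum = (l.map (fun x => (f x).sum)).sum := by
  induction l with
  | nil => rfl
  | cons a t ih => simp only [List.flatMap_cons, List.map_cons, List.sum_cons, List.sum_append, ih]

lemma take_eq_map_range (c : List Int) (m : Nat) (hm : m ≤ c.length) :
    (List.range m).map (fun k => c.getD k 0) = c.take m := by
  induction m with
  | zero => simp
  | succ m ih =>
      rw [List.range_succ]
      simp only [List.map_append, List.map_cons, List.map_nil]
      rw [ih (by omega)]
      have h : m < c.length := by omega
      have h2 : c.getD m 0 = GetElem.getElem c m h := by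
        simp [List.getD_eq_getElem?_getD, List.getElem?_eq_getElem h]
      rw [h2, List.take_add_one, List.getElem?_eq_getElem h]
      simp

-- the sum of all pairwise sums over the first m elements is (m-1) * (their sum)
lemma pairwise_sum_eq (c : List Int) (m : Nat) (hm : m ≤ c.length) :
    ((PySem.List.pyRange 0 (m : Int) 1).map (fun i =>
      ((PySem.List.pyRange (i + 1) (m : Int) 1).map
        (fun j => PySem.List.pyGetD c i 0 + PySem.List.pyGetD c j 0)).sum)).sum
    = ((m : Int) - 1) * (c.take m).sum := by
  induction m with
  | zero => simp [PySem.List.pyRange_one_eq_nil]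
  | succ m ih =>
      have hcast : ((m + 1 : Nat) : Int) = (m : Int) + 1 := by push_cast; ring
      -- split each earlier row at its top index m
      have hrow : ∀ i ∈ PySem.List.pyRange 0 (m : Int) 1,
          ((PySem.List.pyRange (i + 1) ((m : Int) + 1) 1).map
            (fun j => PySem.List.pyGetD c i 0 + PySem.List.pyGetD c j 0)).sum
          = ((PySem.List.pyRange (i + 1) (m : Int) 1).map
            (fun j => PySem.List.pyGetD c i 0 + PySem.List.pyGetD c j 0)).sum
            + (PySem.List.pyGetD c i 0 + PySem.List.pyGetD c m 0) := by
        intro i hi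
        rw [PySem.List.mem_pyRange_one] at hi
        rw [PySem.List.pyRange_one_succ_right (by omega)]
        simp
      rw [hcast, PySem.List.pyRange_one_succ_right (by positivity)]
      simp only [List.map_append, List.map_cons, List.map_nil, List.sum_append, List.sum_cons,
        List.sum_nil]
      -- last row (i = m) is empty
      rw [show PySem.List.pyRange ((m : Int) + 1) ((m : Int) + 1) 1 = [] from
        PySem.List.pyRange_one_eq_nil (le_refl _)]
      simp only [List.map_nil, List.sum_nil]
      rw [List.map_congr_left hrow]
      rw [PySem.List.sum_map_add_int (PySem.List.pyRange 0 (m : Int) 1)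
        (fun i => ((PySem.List.pyRange (i + 1) (m : Int) 1).map
          (fun j => PySem.List.pyGetD c i 0 + PySem.List.pyGetD c j 0)).sum)
        (fun i => PySem.List.pyGetD c i 0 + PySem.List.pyGetD c (m : Int) 0)]
      rw [PySem.List.sum_map_add_int (PySem.List.pyRange 0 (m : Int) 1)
        (fun i => PySem.List.pyGetD c i 0) (fun _ => PySem.List.pyGetD c (m : Int) 0)]
      rw [ih (by omega)]
      -- remaining sums over i < m
      have hm' : m < c.length := by omega
      have hsum : ((PySem.List.pyRange 0 (m : Int) 1).map (fun i => PySem.List.pyGetD c i 0)).sum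
          = (c.take m).sum := by
        rw [PySem.List.pyRange_one]
        simp only [Int.sub_zero, Int.toNat_natCast, List.map_map]
        have : ((fun i => PySem.List.pyGetD c i 0) ∘ fun k : Nat => (0 : Int) + (k : Int))
            = fun k : Nat => c.getD k 0 := by
          funext k; simp [PySem.List.pyGetD_natCast]
        rw [this, take_eq_map_range c m (by omega)]
      have hconst : ((PySem.List.pyRange 0 (m : Int) 1).map
            (fun _ => PySem.List.pyGetD c (m : Int) 0)).sum
          = (m : Int) * PySem.List.pyGetD c (m : Int) 0 := by
        rw [PySem.List.sum_map_const_int]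
        simp [PySem.List.length_pyRange_one]
      rw [hsum, hconst]
      have htake : (c.take (m + 1)).sum = (c.take m).sum + c.getD m 0 := by
        have h2 : c.getD m 0 = GetElem.getElem c m hm' := by
          simp [List.getD_eq_getElem?_getD, List.getElem?_eq_getElem hm']
        rw [h2, List.sum_take_succ c m hm']
      rw [htake]
      have hget : PySem.List.pyGetD c (m : Int) 0 = c.getD m 0 := by
        simp [PySem.List.pyGetD_natCast]
      rw [hget]
      push_cast
      ring

-- ===== VERDICT (by name: the statement is the Claim_ definition above) =====
theorem minimize_costs_spec : Claim_equal_minimize_costs := by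
  intro cables _
  unfold Spec_minimize_costs minimize_costs minimize_costs_alt
  simp only []
  rw [minimizeCostsLoopA_eq]
  rw [((PySem.List.sorted_perm
        ((PySem.List.pyRange 0 (cables.length : Int) 1).flatMap (fun i =>
          (PySem.List.pyRange (i + 1) (cables.length : Int) 1).map (fun j =>
            (i, j, PySem.List.pyGetD cables i 0 + PySem.List.pyGetD cables j 0))))
        (fun x => x.2.2) false).map (fun x : Int × Int × Int => x.2.2)).sum_eq]
  rw [List.map_flatMap]
  simp only [List.map_map, Function.comp_def]
  rw [sum_flatMap_int]
  have h := pairwise_sum_eq cables cables.length (le_refl _)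
  simp only [List.take_length] at h
  rw [zero_add, h]
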